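-- pv_equiv track=rewrite | github.com/lwalsh8/Advent_of_Code | 2015/day_16.py | run_search
-- ===== SOURCE A (Python) =====
-- facts_dict = {
--     'children': 3,
--     'cats': 7,
--     'samoyeds': 2,
--     'pomeranians': 3,
--     'akitas': 0,
--     'vizslas': 0,
--     'goldfish': 5,
--     'trees': 3,
--     'cars': 2,
--     'perfumes': 1}
--
-- all_facts = facts_dict.keys()
--
-- more_than_facts = ['cats', 'trees']
--
-- less_than_facts = ['pomeranians', 'goldfish']
--
-- equal_facts = list(set(all_facts) - set(more_than_facts + less_than_facts))
--
-- def run_search(sues, part_num):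
--     for sue in sues.keys():
--         sues_facts = sues[sue].keys()
--
--         if part_num == '1':
--             rel_dict = {c: facts_dict[c] for c in [e for e in all_facts if e in sues_facts]}
--             sues_rel_dict = {c: sues[sue][c] for c in rel_dict.keys()}
--             if rel_dict == sues_rel_dict:
--                 return sue
--
--         elif part_num == '2':
--             matching = True
--             rel_dict = {c: facts_dict[c] for c in [e for e in equal_facts if e in sues_facts]}
--             sues_rel_dict = {c: sues[sue][c] for c in rel_dict.keys()}
--             less_than_dict = {c: facts_dict[c] for c in [e for e in less_than_facts if e in sues_facts]}
--             more_than_dict = {c: facts_dict[c] for c in [e for e in more_than_facts if e in sues_facts]}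
--
--             if rel_dict == sues_rel_dict:
--                 for c in less_than_dict.keys():
--                     if less_than_dict[c] <= sues[sue][c]:
--                         matching = False
--                 for c in more_than_dict.keys():
--                     if more_than_dict[c] >= sues[sue][c]:
--                         matching = False
--                 if matching:
--                     return sue
-- ===== SOURCE B (Python) =====
-- facts_dict = {
--     'children': 3,
--     'cats': 7,
--     'samoyeds': 2,
--     'pomeranians': 3,
--     'akitas': 0,
--     'vizslas': 0,
--     'goldfish': 5,
--     'trees': 3,
--     'cars': 2,
--     'perfumes': 1}
--
-- more_than_facts = ['cats', 'trees']
--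
-- less_than_facts = ['pomeranians', 'goldfish']
--
--
-- def _fact_ok(fact, value, part_num):
--     """A single listed fact is consistent with the MFCSAM readout."""
--     if fact not in facts_dict:
--         return True
--     target = facts_dict[fact]
--     if part_num == '2':
--         if fact in more_than_facts:
--             return value > target
--         if fact in less_than_facts:
--             return value < target
--     return value == target
--
--
-- def run_search(sues, part_num):
--     if part_num not in ('1', '2'):
--         return None
--     for sue, props in sues.items():
--         if all(_fact_ok(f, v, part_num) for f, v in props.items()):
--             return sue
--     return None
-- ===== Notes on version B (the rewrite author's own statement) =====
-- stated objective: simpler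
-- what changed: Instead of materialising four per-sue dictionaries (rel_dict/sues_rel_dict/less_than_dict/more_than_dict) and comparing/looping over them, B checks each sue with a single per-fact predicate over the sue's own items (skip unknown facts; equality, or strict >/< for cats,trees / pomeranians,goldfish in part 2) via all(...), and rejects unknown part numbers up front.
import Mathlib
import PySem

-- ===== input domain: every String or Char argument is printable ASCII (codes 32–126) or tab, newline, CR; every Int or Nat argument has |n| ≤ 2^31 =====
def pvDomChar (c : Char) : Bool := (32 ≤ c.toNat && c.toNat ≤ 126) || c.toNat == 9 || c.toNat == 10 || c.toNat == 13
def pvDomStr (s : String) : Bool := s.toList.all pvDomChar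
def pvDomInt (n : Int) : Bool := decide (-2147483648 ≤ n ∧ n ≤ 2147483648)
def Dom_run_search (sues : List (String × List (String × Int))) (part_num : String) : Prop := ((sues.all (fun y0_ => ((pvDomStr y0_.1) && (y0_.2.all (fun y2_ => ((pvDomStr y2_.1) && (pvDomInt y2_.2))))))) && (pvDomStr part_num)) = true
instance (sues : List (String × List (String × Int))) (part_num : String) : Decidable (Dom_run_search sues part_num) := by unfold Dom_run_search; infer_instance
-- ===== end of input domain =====

-- B replaces A's four per-sue dictionaries and dict comparisons by one per-fact predicate over the sue's own items (objective: simpler).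

-- ===== PORT A =====
-- module-level context shared by both Pythons
def pvFactsDict : PySem.Dict String Int :=
  PySem.Dict.ofList [("children",3),("cats",7),("samoyeds",2),("pomeranians",3),("akitas",0),("vizslas",0),("goldfish",5),("trees",3),("cars",2),("perfumes",1)]
def pvAllFacts : List String := ["children","cats","samoyeds","pomeranians","akitas","vizslas","goldfish","trees","cars","perfumes"]
def pvMore : List String := ["cats","trees"]
def pvLess : List String := ["pomeranians","goldfish"]
-- equal_facts = list(set(all_facts) - set(more+less)); CPython's set iteration order is arbitrary and only
-- affects the key order of dictionaries that A compares with order-insensitive dict ==, so this fixed order is faithful.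
def pvEqualFacts : List String := pvAllFacts.filter (fun e => !((pvMore ++ pvLess).contains e))

-- part '1' body for one sue (f = that sue's fact dict); the two comprehensions produce the same
-- duplicate-free key sequence, so Python's order-insensitive dict == is exactly list equality here.
def pvMatches1 (f : PySem.Dict String Int) : Bool :=
  let ks := pvAllFacts.filter (fun e => f.contains e)
  let rel := ks.map (fun c => (c, pvFactsDict.getD c 0))
  let srel := ks.map (fun c => (c, f.getD c 0))
  rel == srel

-- part '2' body for one sue, with the two matching-flag loops transcribed as foldl over the flag
def pvMatches2 (f : PySem.Dict String Int) : Bool :=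
  let ks := pvEqualFacts.filter (fun e => f.contains e)
  let rel := ks.map (fun c => (c, pvFactsDict.getD c 0))
  let srel := ks.map (fun c => (c, f.getD c 0))
  let keysL := pvLess.filter (fun e => f.contains e)
  let keysM := pvMore.filter (fun e => f.contains e)
  if rel == srel then
    let m1 := keysL.foldl (fun m c => if pvFactsDict.getD c 0 ≤ f.getD c 0 then false else m) true
    let m2 := keysM.foldl (fun m c => if pvFactsDict.getD c 0 ≥ f.getD c 0 then false else m) m1
    m2
  else false

def pvSearchA : List (String × List (String × Int)) → String → Option String
  | [], _ => none
  | (su, fl) :: rest, p =>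
    let f := PySem.Dict.ofList fl
    if p = "1" then (if pvMatches1 f then some su else pvSearchA rest p)
    else if p = "2" then (if pvMatches2 f then some su else pvSearchA rest p)
    else pvSearchA rest p

def run_search (sues : List (String × List (String × Int))) (part_num : String) : Option String :=
  pvSearchA (PySem.Dict.ofList sues).items part_num

-- ===== PORT B =====
def pvFactOk (part_num : String) (fact : String) (value : Int) : Bool :=
  if pvFactsDict.contains fact then
    let target := pvFactsDict.getD fact 0
    if part_num = "2" then
      if pvMore.contains fact then target < value
      else if pvLess.contains fact then value < target
      else value == target
    else value == target
  else true

def pvSearchB : List (String × List (String × Int)) → String → Option String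
  | [], _ => none
  | (su, fl) :: rest, p =>
    if (PySem.Dict.ofList fl).items.all (fun kv => pvFactOk p kv.1 kv.2) then some su
    else pvSearchB rest p

def run_search_alt (sues : List (String × List (String × Int))) (part_num : String) : Option String :=
  if part_num = "1" ∨ part_num = "2" then pvSearchB (PySem.Dict.ofList sues).items part_num
  else none

-- ===== PRECONDITION & SPEC =====
def Spec_run_search (sues : List (String × List (String × Int))) (part_num : String) (out : Option String) : Prop := out = run_search_alt sues part_num
instance (sues : List (String × List (String × Int))) (part_num : String) (out : Option String) : Decidable (Spec_run_search sues part_num out) := by unfold Spec_run_search; infer_instance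

-- ===== CLAIM (what is proved, stated in full; the proofs are below) =====
def Claim_equal_run_search : Prop := ∀ (sues : List (String × List (String × Int))) (part_num : String), Dom_run_search sues part_num → Spec_run_search sues part_num (run_search sues part_num)

-- ===== LEMMAS AND PROOFS =====

-- the per-sue condition A's part-2 branch tests, factored out
def pvCond2 (f : PySem.Dict String Int) : Prop :=
  (∀ c ∈ pvEqualFacts, f.contains c = true → pvFactsDict.getD c 0 = f.getD c 0) ∧
  (∀ c ∈ pvLess, f.contains c = true → f.getD c 0 < pvFactsDict.getD c 0) ∧
  (∀ c ∈ pvMore, f.contains c = true → pvFactsDict.getD c 0 < f.getD c 0)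

theorem pv_fd_contains (c : String) : pvFactsDict.contains c = true ↔ c ∈ pvAllFacts := by
  rw [PySem.Dict.contains_iff_mem_keys]
  show c ∈ pvFactsDict.keys ↔ c ∈ pvAllFacts
  have h : pvFactsDict.keys = pvAllFacts := by decide
  rw [h]

theorem pv_foldl_flag (P : String → Prop) [DecidablePred P] (l : List String) (b : Bool) :
    l.foldl (fun m c => if P c then false else m) b = (b && l.all (fun c => !decide (P c))) := by
  induction l generalizing b with
  | nil => simp
  | cons x xs ih =>
    simp only [List.foldl_cons, List.all_cons, ih]
    by_cases hx : P x <;> simp [hx]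

theorem pv_get_exists (f : PySem.Dict String Int) (c : String) (h : f.contains c = true) :
    ∃ v, f.get? c = some v := by
  have := PySem.Dict.contains_eq_isSome_get? f c
  rw [h] at this
  cases hg : f.get? c with
  | none => rw [hg] at this; simp at this
  | some v => exact ⟨v, rfl⟩

theorem pv_matches1_iff (f : PySem.Dict String Int) :
    pvMatches1 f = true ↔ ∀ c ∈ pvAllFacts, f.contains c = true → pvFactsDict.getD c 0 = f.getD c 0 := by
  unfold pvMatches1
  simp only [beq_iff_eq, List.map_eq_map_iff, List.mem_filter, Prod.mk.injEq, true_and, and_imp]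

theorem pv_allB1_iff (f : PySem.Dict String Int) (hn : f.keys.Nodup) (p : String) (hp : p ≠ "2") :
    (f.items.all (fun kv => pvFactOk p kv.1 kv.2) = true) ↔
      ∀ c ∈ pvAllFacts, f.contains c = true → pvFactsDict.getD c 0 = f.getD c 0 := by
  rw [List.all_eq_true]
  constructor
  · intro h c hc hfc
    obtain ⟨v, hv⟩ := pv_get_exists f c hfc
    have hmem : (c, v) ∈ f.items := (PySem.Dict.get?_eq_some_iff_mem_items f c v hn).mp hv
    have hok := h _ hmem
    have hfd : pvFactsDict.contains c = true := (pv_fd_contains c).mpr hc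
    simp only [pvFactOk, hfd, if_true, hp, if_false, beq_iff_eq] at hok
    have hg : f.getD c 0 = v := PySem.Dict.getD_of_get?_eq_some f 0 hv
    omega
  · rintro h ⟨k, v⟩ hkv
    by_cases hfd : pvFactsDict.contains k = true
    · have hk : k ∈ pvAllFacts := (pv_fd_contains k).mp hfd
      have hfk : f.contains k = true :=
        (PySem.Dict.contains_iff_mem_keys f k).mpr (PySem.Dict.mem_keys_of_mem_items f hkv)
      have h1 := h k hk hfk
      have h2 : f.getD k 0 = v := PySem.Dict.getD_of_mem_items f hkv hn 0
      simp only [pvFactOk, hfd, if_true, hp, if_false, beq_iff_eq]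
      omega
    · simp only [Bool.not_eq_true] at hfd
      simp [pvFactOk, hfd]

-- literal classification facts about the four fact lists
theorem pv_eq_facts : ∀ c ∈ pvEqualFacts,
    c ∈ pvAllFacts ∧ pvMore.contains c = false ∧ pvLess.contains c = false := by decide
theorem pv_less_facts : ∀ c ∈ pvLess,
    c ∈ pvAllFacts ∧ pvMore.contains c = false ∧ pvLess.contains c = true := by decide
theorem pv_more_facts : ∀ c ∈ pvMore, c ∈ pvAllFacts ∧ pvMore.contains c = true := by decide
theorem pv_split_facts : ∀ c ∈ pvAllFacts,
    (pvMore.contains c = true ∧ c ∈ pvMore) ∨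
    (pvMore.contains c = false ∧ pvLess.contains c = true ∧ c ∈ pvLess) ∨
    (pvMore.contains c = false ∧ pvLess.contains c = false ∧ c ∈ pvEqualFacts) := by decide

theorem pv_matches2_iff (f : PySem.Dict String Int) : pvMatches2 f = true ↔ pvCond2 f := by
  simp only [pvMatches2, pvCond2]
  rw [pv_foldl_flag (fun c => pvFactsDict.getD c 0 ≤ f.getD c 0),
    pv_foldl_flag (fun c => pvFactsDict.getD c 0 ≥ f.getD c 0)]
  by_cases hr : (pvEqualFacts.filter (fun e => f.contains e)).map (fun c => (c, pvFactsDict.getD c 0)) =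
      (pvEqualFacts.filter (fun e => f.contains e)).map (fun c => (c, f.getD c 0))
  · have hr' : ∀ c ∈ pvEqualFacts, f.contains c = true → pvFactsDict.getD c 0 = f.getD c 0 := by
      have := List.map_eq_map_iff.mp hr
      intro c hc hfc
      have h2 := this c (List.mem_filter.mpr ⟨hc, hfc⟩)
      exact (Prod.mk.injEq _ _ _ _).mp h2 |>.2
    simp only [hr, beq_self_eq_true, if_true, Bool.true_and, Bool.and_eq_true, List.all_eq_true,
      List.mem_filter, and_imp, Bool.not_eq_eq_eq_not, Bool.not_true,
      decide_eq_false_iff_not, not_le, ge_iff_le]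
    constructor
    · rintro ⟨hL, hM⟩
      exact ⟨hr', fun c hc hfc => hL c hc hfc, fun c hc hfc => hM c hc hfc⟩
    · rintro ⟨_, hL, hM⟩
      exact ⟨fun c hc hfc => hL c hc hfc, fun c hc hfc => hM c hc hfc⟩
  · have : ((pvEqualFacts.filter (fun e => f.contains e)).map (fun c => (c, pvFactsDict.getD c 0)) ==
        (pvEqualFacts.filter (fun e => f.contains e)).map (fun c => (c, f.getD c 0))) = false := by
      simpa using hr
    simp only [this, Bool.false_eq_true, if_false, false_iff]
    rintro ⟨hE, _, _⟩
    apply hr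
    rw [List.map_eq_map_iff]
    intro c hc
    obtain ⟨h1, h2⟩ := List.mem_filter.mp hc
    rw [hE c h1 h2]

theorem pv_allB2_iff (f : PySem.Dict String Int) (hn : f.keys.Nodup) :
    (f.items.all (fun kv => pvFactOk "2" kv.1 kv.2) = true) ↔ pvCond2 f := by
  rw [List.all_eq_true]
  constructor
  · intro h
    refine ⟨?_, ?_, ?_⟩
    · intro c hc hfc
      obtain ⟨hca, hm, hl⟩ := pv_eq_facts c hc
      obtain ⟨v, hv⟩ := pv_get_exists f c hfc
      have hmem : (c, v) ∈ f.items := (PySem.Dict.get?_eq_some_iff_mem_items f c v hn).mp hv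
      have hok := h _ hmem
      have hfd : pvFactsDict.contains c = true := (pv_fd_contains c).mpr hca
      simp only [pvFactOk, hfd, if_true, hm, hl, Bool.false_eq_true, if_false,
        beq_iff_eq] at hok
      have hg : f.getD c 0 = v := PySem.Dict.getD_of_get?_eq_some f 0 hv
      omega
    · intro c hc hfc
      obtain ⟨hca, hm, hl⟩ := pv_less_facts c hc
      obtain ⟨v, hv⟩ := pv_get_exists f c hfc
      have hmem : (c, v) ∈ f.items := (PySem.Dict.get?_eq_some_iff_mem_items f c v hn).mp hv
      have hok := h _ hmem
      have hfd : pvFactsDict.contains c = true := (pv_fd_contains c).mpr hca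
      simp only [pvFactOk, hfd, if_true, hm, hl, Bool.false_eq_true, if_false,
        decide_eq_true_eq] at hok
      have hg : f.getD c 0 = v := PySem.Dict.getD_of_get?_eq_some f 0 hv
      omega
    · intro c hc hfc
      obtain ⟨hca, hm⟩ := pv_more_facts c hc
      obtain ⟨v, hv⟩ := pv_get_exists f c hfc
      have hmem : (c, v) ∈ f.items := (PySem.Dict.get?_eq_some_iff_mem_items f c v hn).mp hv
      have hok := h _ hmem
      have hfd : pvFactsDict.contains c = true := (pv_fd_contains c).mpr hca
      simp only [pvFactOk, hfd, if_true, hm, decide_eq_true_eq] at hok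
      have hg : f.getD c 0 = v := PySem.Dict.getD_of_get?_eq_some f 0 hv
      omega
  · rintro ⟨hE, hL, hM⟩ ⟨k, v⟩ hkv
    by_cases hfd : pvFactsDict.contains k = true
    · have hk : k ∈ pvAllFacts := (pv_fd_contains k).mp hfd
      have hfk : f.contains k = true :=
        (PySem.Dict.contains_iff_mem_keys f k).mpr (PySem.Dict.mem_keys_of_mem_items f hkv)
      have hg : f.getD k 0 = v := PySem.Dict.getD_of_mem_items f hkv hn 0
      rcases pv_split_facts k hk with ⟨hm, hkm⟩ | ⟨hm, hl, hkl⟩ | ⟨hm, hl, hke⟩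
      · have := hM k hkm hfk
        simp only [pvFactOk, hfd, if_true, hm, decide_eq_true_eq]
        omega
      · have := hL k hkl hfk
        simp only [pvFactOk, hfd, if_true, hm, hl, Bool.false_eq_true, if_false,
          decide_eq_true_eq]
        omega
      · have := hE k hke hfk
        simp only [pvFactOk, hfd, if_true, hm, hl, Bool.false_eq_true, if_false,
          beq_iff_eq]
        omega
    · simp only [Bool.not_eq_true] at hfd
      simp [pvFactOk, hfd]

theorem pv_bool_eq_of_iff {a b : Bool} (h : a = true ↔ b = true) : a = b := by
  cases a <;> cases b <;> simp_all

theorem pv_searchA_other (l : List (String × List (String × Int))) (p : String)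
    (h1 : p ≠ "1") (h2 : p ≠ "2") : pvSearchA l p = none := by
  induction l with
  | nil => rfl
  | cons x xs ih => cases x; simp [pvSearchA, h1, h2, ih]

theorem pv_searchAB1 (l : List (String × List (String × Int))) :
    pvSearchA l "1" = pvSearchB l "1" := by
  induction l with
  | nil => rfl
  | cons x xs ih =>
    obtain ⟨su, fl⟩ := x
    have hb : pvMatches1 (PySem.Dict.ofList fl) =
        (PySem.Dict.ofList fl).items.all (fun kv => pvFactOk "1" kv.1 kv.2) :=
      pv_bool_eq_of_iff ((pv_matches1_iff _).trans
        (pv_allB1_iff _ (PySem.Dict.nodup_keys_ofList fl) "1" (by decide)).symm)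
    have hA : pvSearchA ((su, fl) :: xs) "1" =
        (if pvMatches1 (PySem.Dict.ofList fl) = true then some su else pvSearchA xs "1") := rfl
    have hB : pvSearchB ((su, fl) :: xs) "1" =
        (if ((PySem.Dict.ofList fl).items.all fun kv => pvFactOk "1" kv.1 kv.2) = true then some su
         else pvSearchB xs "1") := rfl
    rw [hA, hB, hb, ih]

theorem pv_searchAB2 (l : List (String × List (String × Int))) :
    pvSearchA l "2" = pvSearchB l "2" := by
  induction l with
  | nil => rfl
  | cons x xs ih =>
    obtain ⟨su, fl⟩ := x
    have hb : pvMatches2 (PySem.Dict.ofList fl) =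
        (PySem.Dict.ofList fl).items.all (fun kv => pvFactOk "2" kv.1 kv.2) :=
      pv_bool_eq_of_iff ((pv_matches2_iff _).trans
        (pv_allB2_iff _ (PySem.Dict.nodup_keys_ofList fl)).symm)
    have hA : pvSearchA ((su, fl) :: xs) "2" =
        (if pvMatches2 (PySem.Dict.ofList fl) = true then some su else pvSearchA xs "2") := rfl
    have hB : pvSearchB ((su, fl) :: xs) "2" =
        (if ((PySem.Dict.ofList fl).items.all fun kv => pvFactOk "2" kv.1 kv.2) = true then some su
         else pvSearchB xs "2") := rfl
    rw [hA, hB, hb, ih]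

-- ===== VERDICT (by name: the statement is the Claim_ definition above) =====
theorem run_search_spec : Claim_equal_run_search := by
  intro sues part_num _
  unfold Spec_run_search run_search run_search_alt
  by_cases h1 : part_num = "1"
  · subst h1
    rw [if_pos (Or.inl rfl)]
    exact pv_searchAB1 _
  · by_cases h2 : part_num = "2"
    · subst h2
      rw [if_pos (Or.inr rfl)]
      exact pv_searchAB2 _
    · rw [if_neg (by tauto)]
      exact pv_searchA_other _ _ h1 h2
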